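-- pv_equiv track=rewrite | github.com/IsraZex777/project_euler_answers | answers/utils.py | get_factors_of_all_numbers_less_than
-- ===== SOURCE A (Python) =====
-- def get_factors_of_all_numbers_less_than(num: int) -> dict:
--     """
--     Creates number to factors dict of all numbers less then 'num'
--     :param num:
--     :return:
--     """
--     factor_mat = [[] for index in range(0, num + 1)]
--
--     # adds factors to the proper products
--     for curr_factor in range(1, num + 1):
--         products = range(curr_factor, num + 1, curr_factor)
--
--         # Adds index into each products' factor list (instead of the index product)
--         for product in products[1:]:
--             factor_mat[product].append(curr_factor)
--
--     product_to_factors = {}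
--     # adds factors to the matrix
--     for product in range(1, num + 1):
--         product_to_factors[product] = factor_mat[product]
--
--     return product_to_factors
-- ===== SOURCE B (Python) =====
-- def get_factors_of_all_numbers_less_than(num: int) -> dict:
--     """Different algorithm: mark each number with one prime factor, then build every
--     number's full divisor list multiplicatively from its prime factorization and sort;
--     the proper divisors are that sorted list without its last element (the number itself)."""
--     fac = [0] * (num + 1)
--     for i in range(2, num + 1):
--         if fac[i] == 0:
--             for j in range(i, num + 1, i):
--                 if fac[j] == 0:
--                     fac[j] = i
--     res = {}
--     for p in range(1, num + 1):
--         divs = [1]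
--         m = p
--         while m > 1:
--             q = fac[m]
--             pows = []
--             pw = 1
--             while m % q == 0:
--                 m //= q
--                 pw *= q
--                 pows.append(pw)
--             divs = divs + [d * w for d in divs for w in pows]
--         divs.sort()
--         res[p] = divs[:-1]
--     return res
-- ===== Notes on version B (the rewrite author's own statement) =====
-- stated objective: alternative
-- what changed: B computes nothing by sweeping divisors into multiples' lists: it marks each number with one prime factor in a prime-marking pass, then builds every number's divisor list multiplicatively from its prime factorization (products of prime powers), sorts it, and drops the last element (the number itself) to get the proper divisors.
import Mathlib
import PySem

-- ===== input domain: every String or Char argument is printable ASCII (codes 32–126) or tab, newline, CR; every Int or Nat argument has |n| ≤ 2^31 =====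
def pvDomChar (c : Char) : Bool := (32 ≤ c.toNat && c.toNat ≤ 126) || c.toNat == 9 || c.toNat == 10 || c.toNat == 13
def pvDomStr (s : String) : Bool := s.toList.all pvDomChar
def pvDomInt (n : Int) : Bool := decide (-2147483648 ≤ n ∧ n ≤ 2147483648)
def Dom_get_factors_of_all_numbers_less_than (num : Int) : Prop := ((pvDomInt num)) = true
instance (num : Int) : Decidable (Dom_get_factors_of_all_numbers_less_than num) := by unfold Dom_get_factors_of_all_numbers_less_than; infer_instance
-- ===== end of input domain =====

-- B abandons the divisor sweep: a prime-marking pass tags each number with a prime factor,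
-- every number's divisor list is then built multiplicatively from its factorization, sorted,
-- and the number itself dropped (objective: alternative; comparable cost, not faster).


-- ===== PORT A =====
def get_factors_of_all_numbers_less_than (num : Int) : List (Int × List Int) :=
  -- factor_mat = [[] for index in range(0, num + 1)]
  let factor_mat : List (List Int) :=
    (PySem.List.pyRange 0 (num + 1) 1).map (fun _ => ([] : List Int))
  -- for curr_factor in range(1, num + 1): for product in products[1:]: factor_mat[product].append(curr_factor)
  -- (the index 'product' is always ≥ 1 and < len(factor_mat), so the list update at product.toNat is exact)
  let factor_mat :=
    (PySem.List.pyRange 1 (num + 1) 1).foldl (fun fm curr_factor =>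
      (PySem.List.slice (PySem.List.pyRange curr_factor (num + 1) curr_factor) (some 1) none).foldl
        (fun fm product => fm.modify product.toNat (fun l => l ++ [curr_factor])) fm) factor_mat
  -- product_to_factors[product] = factor_mat[product] over fresh keys 1..num in order: dict insertion is append
  (PySem.List.pyRange 1 (num + 1) 1).foldl
    (fun acc product => acc ++ [(product, PySem.List.pyGetD factor_mat product [])]) []

-- ===== PORT B =====
-- fac = [0]*(num+1); for i in 2..num: if fac[i]==0: for j in range(i, num+1, i): if fac[j]==0: fac[j]=i
-- (indices i, j are ≥ 2 and ≤ num, so the reads fac[i], fac[j] and the update at j.toNat are exact)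
def pvFac (num : Int) : List Int :=
  (PySem.List.pyRange 2 (num + 1) 1).foldl (fun fac i =>
    if PySem.List.pyGetD fac i 0 == 0 then
      (PySem.List.pyRange i (num + 1) i).foldl (fun fac j =>
        if PySem.List.pyGetD fac j 0 == 0 then fac.modify j.toNat (fun _ => i) else fac) fac
    else fac) (List.replicate (num + 1).toNat 0)

-- inner 'while m % q == 0: m //= q; pw *= q; pows.append(pw)'; the fuel only makes the
-- recursion structural (m strictly decreases on every admitted input, so it never runs out)
def pvStrip (q : Int) : Nat → Int → Int → List Int → Int × Int × List Int
  | 0, m, pw, pows => (m, pw, pows)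
  | fuel + 1, m, pw, pows =>
    if PySem.Int.mod m q == 0 then
      pvStrip q fuel (PySem.Int.floordiv m q) (pw * q) (pows ++ [pw * q])
    else (m, pw, pows)

-- outer 'while m > 1: q = fac[m]; …; divs = divs + [d * w for d in divs for w in pows]'
def pvGen (fac : List Int) : Nat → Int → List Int → List Int
  | 0, _, divs => divs
  | fuel + 1, m, divs =>
    if 1 < m then
      pvGen fac fuel (pvStrip (PySem.List.pyGetD fac m 0) m.toNat m 1 []).1
        (divs ++ divs.flatMap (fun d =>
          (pvStrip (PySem.List.pyGetD fac m 0) m.toNat m 1 []).2.2.map (fun w => d * w)))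
    else divs

def get_factors_of_all_numbers_less_than_alt (num : Int) : List (Int × List Int) :=
  let fac := pvFac num
  -- res[p] = sorted(divs)[:-1] over fresh keys 1..num in order: dict insertion is append
  (PySem.List.pyRange 1 (num + 1) 1).foldl
    (fun acc p => acc ++ [(p,
      PySem.List.slice (PySem.List.sorted (pvGen fac p.toNat p [1]) (fun x => x) false)
        none (some (-1)))]) []

-- ===== PRECONDITION & SPEC =====
def Spec_get_factors_of_all_numbers_less_than (num : Int) (out : List (Int × List Int)) : Prop := out = get_factors_of_all_numbers_less_than_alt num
instance (num : Int) (out : List (Int × List Int)) : Decidable (Spec_get_factors_of_all_numbers_less_than num out) := by unfold Spec_get_factors_of_all_numbers_less_than; infer_instance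

-- ===== CLAIM (what is proved, stated in full; the proofs are below) =====
def Claim_equal_get_factors_of_all_numbers_less_than : Prop := ∀ (num : Int), Dom_get_factors_of_all_numbers_less_than num → Spec_get_factors_of_all_numbers_less_than num (get_factors_of_all_numbers_less_than num)

-- ===== LEMMAS AND PROOFS =====

lemma pv_nodup_pyRange (a b s : Int) (hs : 0 < s) :
    (PySem.List.pyRange a b s).Nodup := by
  rw [PySem.List.pyRange_of_pos a b hs]
  apply List.Nodup.map _ List.nodup_range
  intro x y h
  have h2 : s * (x:Int) = s * y := by
    have : a + s * (x:Int) = a + s * y := h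
    omega
  have := mul_left_cancel₀ (by omega : (s:Int) ≠ 0) h2
  exact_mod_cast this

lemma pv_pyRange_cons (a b s : Int) (hs : 0 < s) (hab : a < b) :
    PySem.List.pyRange a b s = a :: (PySem.List.pyRange a b s).tail := by
  rw [PySem.List.pyRange_of_pos a b hs, if_pos hab]
  have hm : ((b - a + s - 1) / s).toNat ≠ 0 := by
    have h1 : (1:Int) ≤ (b - a + s - 1) / s := by
      rw [Int.le_ediv_iff_mul_le hs]; omega
    omega
  obtain ⟨m, hm'⟩ := Nat.exists_eq_succ_of_ne_zero hm
  rw [hm', List.range_succ_eq_map]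
  simp

lemma pv_two_mul_le (d p : Int) (hd : 1 ≤ d) (hlt : d < p) (hdvd : d ∣ p) : 2 * d ≤ p := by
  obtain ⟨k, hk⟩ := hdvd
  have hk1 : 1 ≤ k := by nlinarith
  have hk2 : 2 ≤ k := by
    rcases eq_or_lt_of_le hk1 with h | h
    · exfalso; rw [← h] at hk; omega
    · omega
  nlinarith

lemma pv_mem_multiples (num cf x : Int) (hcf : 1 ≤ cf) :
    x ∈ (PySem.List.pyRange cf (num + 1) cf).tail ↔ 2 * cf ≤ x ∧ x < num + 1 ∧ cf ∣ x := by
  by_cases hab : cf < num + 1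
  · have hcons := pv_pyRange_cons cf (num + 1) cf (by omega) hab
    have hnd := pv_nodup_pyRange cf (num + 1) cf (by omega)
    have hmem : x ∈ (PySem.List.pyRange cf (num + 1) cf).tail ↔
        x ∈ PySem.List.pyRange cf (num + 1) cf ∧ x ≠ cf := by
      constructor
      · intro hx
        refine ⟨by rw [hcons]; exact List.mem_cons_of_mem _ hx, ?_⟩
        rintro rfl
        rw [hcons] at hnd
        exact (List.nodup_cons.mp hnd).1 hx
      · rintro ⟨hx, hne⟩
        rw [hcons] at hx
        rcases List.mem_cons.mp hx with h | h
        · exact absurd h hne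
        · exact h
    rw [hmem, PySem.List.mem_pyRange_iff_of_pos (by omega)]
    constructor
    · rintro ⟨⟨h1, h2, h3⟩, h4⟩
      have hdvd : cf ∣ x := by
        have := dvd_add h3 (dvd_refl cf)
        simpa using this
      exact ⟨pv_two_mul_le cf x hcf (by omega) hdvd, h2, hdvd⟩
    · rintro ⟨h1, h2, h3⟩
      refine ⟨⟨by omega, h2, ?_⟩, by omega⟩
      exact dvd_sub h3 dvd_rfl
  · have : PySem.List.pyRange cf (num + 1) cf = [] := by
      rw [PySem.List.pyRange_of_pos _ _ (by omega : (0:Int) < cf), if_neg hab]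
      simp
    rw [this]
    simp
    omega

lemma pv_inner (cf : Int) (L : List Int) (hL : ∀ q ∈ L, 0 ≤ q) (fm : List (List Int)) (j : Nat) :
    (L.foldl (fun fm product => fm.modify product.toNat (fun l => l ++ [cf])) fm)[j]? =
      fm[j]?.map (fun l => l ++ List.replicate (L.count (j : Int)) cf) := by
  induction L generalizing fm with
  | nil => simp
  | cons q L ih =>
    have hq : 0 ≤ q := hL q (by simp)
    rw [List.foldl_cons, ih (fun x hx => hL x (by simp [hx]))]
    rw [List.getElem?_modify]
    have hiff : q.toNat = j ↔ q = (j : Int) := by omega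
    cases h : fm[j]? with
    | none => simp
    | some l =>
      by_cases hqj : q = (j : Int)
      · simp [hqj, List.replicate_succ]
      · have hne : q.toNat ≠ j := fun hh => hqj (hiff.mp hh)
        simp [hne, List.count_cons]
        exact hqj

lemma pv_outer (num : Int) (C : List Int) (hC : ∀ c ∈ C, 1 ≤ c) (fm : List (List Int)) (j : Nat) :
    (C.foldl (fun fm cf =>
        ((PySem.List.pyRange cf (num + 1) cf).tail).foldl
          (fun fm product => fm.modify product.toNat (fun l => l ++ [cf])) fm) fm)[j]? =
      fm[j]?.map (fun l => l ++ C.filter (fun cf => decide (2 * cf ≤ (j : Int) ∧ (j : Int) < num + 1 ∧ cf ∣ (j : Int)))) := by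
  induction C generalizing fm with
  | nil => simp
  | cons c C ih =>
    have hc : 1 ≤ c := hC c (by simp)
    rw [List.foldl_cons, ih (fun x hx => hC x (by simp [hx]))]
    rw [pv_inner c _ (fun q hq => by
      have := (pv_mem_multiples num c q hc).mp hq
      omega) fm j]
    have hnd : ((PySem.List.pyRange c (num + 1) c).tail).Nodup :=
      (pv_nodup_pyRange c (num + 1) c (by omega)).sublist (List.tail_sublist _)
    by_cases hcond : 2 * c ≤ (j : Int) ∧ (j : Int) < num + 1 ∧ c ∣ (j : Int)
    · have hmem : (j : Int) ∈ (PySem.List.pyRange c (num + 1) c).tail :=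
        (pv_mem_multiples num c j hc).mpr hcond
      have hcount : List.count ((j : Int)) ((PySem.List.pyRange c (num + 1) c).tail) = 1 :=
        List.count_eq_one_of_mem hnd hmem
      cases h : fm[j]? with
      | none => simp
      | some l => simp [hcount, hcond]
    · have hmem : (j : Int) ∉ (PySem.List.pyRange c (num + 1) c).tail := by
        rw [pv_mem_multiples num c _ hc]; exact hcond
      have hcount : List.count ((j : Int)) ((PySem.List.pyRange c (num + 1) c).tail) = 0 :=
        List.count_eq_zero_of_not_mem hmem
      cases h : fm[j]? with
      | none => simp
      | some l =>
        simp [hcount]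
        rw [List.filter_cons_of_neg]
        simp
        intro h1 h2
        exact fun hd => hcond ⟨h1, by omega, hd⟩

lemma pv_mem_full_multiples (num k x : Int) (hk : 1 ≤ k) :
    x ∈ PySem.List.pyRange k (num + 1) k ↔ k ≤ x ∧ x < num + 1 ∧ k ∣ x := by
  rw [PySem.List.mem_pyRange_iff_of_pos (by omega)]
  constructor
  · rintro ⟨h1, h2, h3⟩
    refine ⟨h1, h2, ?_⟩
    have := dvd_add h3 (dvd_refl k)
    simpa using this
  · rintro ⟨h1, h2, h3⟩
    exact ⟨h1, h2, dvd_sub h3 dvd_rfl⟩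

-- pointwise effect of the conditional-marking inner loop, over an arbitrary nodup index list
lemma pv_facInnerL (i : Int) (L : List Int) (hL : ∀ j ∈ L, 0 ≤ j) (hnd : L.Nodup)
    (fac : List Int) (t : Nat) :
    (L.foldl (fun fac j =>
        if PySem.List.pyGetD fac j 0 == 0 then fac.modify j.toNat (fun _ => i) else fac) fac)[t]? =
      fac[t]?.map (fun v => if (t : Int) ∈ L ∧ v = 0 then i else v) := by
  induction L generalizing fac with
  | nil => simp
  | cons q L ih =>
    have hq : 0 ≤ q := hL q (by simp)
    have hndL : L.Nodup := (List.nodup_cons.mp hnd).2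
    rw [List.foldl_cons, ih (fun x hx => hL x (by simp [hx])) hndL]
    by_cases hqt : q = (t : Int)
    · have hqn : q.toNat = t := by omega
      have hnotL : (t : Int) ∉ L := by rw [← hqt]; exact (List.nodup_cons.mp hnd).1
      have hgd : PySem.List.pyGetD fac q 0 = fac.getD t 0 := by
        rw [show q = ((t : Nat) : Int) by omega, PySem.List.pyGetD_natCast]
      cases h : fac[t]? with
      | none =>
        have hlen : fac.length ≤ t := List.getElem?_eq_none_iff.mp h
        have hv : PySem.List.pyGetD fac q 0 = 0 := by
          rw [hgd, List.getD_eq_default _ _ hlen]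
        rw [hv]
        simp only [BEq.rfl, if_true]
        rw [List.getElem?_modify, hqn]
        simp [h]
      | some v =>
        have hv : PySem.List.pyGetD fac q 0 = v := by
          rw [hgd, List.getD_eq_getElem?_getD, h, Option.getD_some]
        rw [hv]
        by_cases hv0 : v = 0
        · subst hv0
          simp only [BEq.rfl, if_true]
          rw [List.getElem?_modify, hqn]
          simp [h, hnotL, hqt]
        · have : (v == (0:Int)) = false := by simp [hv0]
          rw [this]
          simp only [Bool.false_eq_true, if_false, h, Option.map_some]
          simp [hnotL, hqt, hv0]
    · have hne : q.toNat ≠ t := by omega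
      have hpres : (if PySem.List.pyGetD fac q 0 == 0 then
          fac.modify q.toNat (fun _ => i) else fac)[t]? = fac[t]? := by
        split
        · rw [List.getElem?_modify]
          simp [hne]
        · rfl
      rw [hpres]
      cases h : fac[t]? with
      | none => simp
      | some v =>
        simp only [Option.map_some, Option.some.injEq]
        have hmemiff : (t : Int) ∈ q :: L ↔ (t : Int) ∈ L := by
          rw [List.mem_cons, or_iff_right (fun hh => hqt hh.symm)]
        simp only [hmemiff]

lemma pv_facInner (num i : Int) (hi : 1 ≤ i) (fac : List Int) (t : Nat) :
    ((PySem.List.pyRange i (num + 1) i).foldl (fun fac j =>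
        if PySem.List.pyGetD fac j 0 == 0 then fac.modify j.toNat (fun _ => i) else fac) fac)[t]? =
      fac[t]?.map (fun v =>
        if (i ≤ (t : Int) ∧ (t : Int) < num + 1 ∧ i ∣ (t : Int)) ∧ v = 0 then i else v) := by
  rw [pv_facInnerL i _ (fun j hj => by
      have := (pv_mem_full_multiples num i j hi).mp hj; omega)
    (pv_nodup_pyRange i (num + 1) i (by omega)) fac t]
  cases h : fac[t]? with
  | none => simp
  | some v =>
    simp only [Option.map_some, Option.some.injEq]
    have hmem := pv_mem_full_multiples num i (t : Int) hi
    simp only [hmem]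

lemma pv_facInnerLen (i : Int) (L : List Int) (fac : List Int) :
    (L.foldl (fun fac j =>
        if PySem.List.pyGetD fac j 0 == 0 then fac.modify j.toNat (fun _ => i) else fac) fac).length =
      fac.length := by
  induction L generalizing fac with
  | nil => rfl
  | cons q L ih =>
    rw [List.foldl_cons, ih]
    split
    · exact List.length_modify ..
    · rfl

def pvFacInv (num bnd : Int) (fac : List Int) : Prop :=
  fac.length = (num + 1).toNat ∧
  ∀ t : Nat, ∀ v : Int, fac[t]? = some v →
    ((v = 0 ∧ ∀ q : Int, 2 ≤ q → q ≤ bnd → Nat.Prime q.toNat → 1 ≤ (t : Int) → ¬ q ∣ (t : Int)) ∨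
     (Nat.Prime v.toNat ∧ v ∣ (t : Int) ∧ 2 ≤ v ∧ v ≤ bnd))

lemma pv_facStep (num i : Int) (hi : 2 ≤ i) (hnum : i ≤ num) (fac : List Int)
    (hinv : pvFacInv num (i - 1) fac) :
    pvFacInv num i (if PySem.List.pyGetD fac i 0 == 0 then
      (PySem.List.pyRange i (num + 1) i).foldl (fun fac j =>
        if PySem.List.pyGetD fac j 0 == 0 then fac.modify j.toNat (fun _ => i) else fac) fac
    else fac) := by
  obtain ⟨hlen, hprop⟩ := hinv
  have hiN : i.toNat < fac.length := by rw [hlen]; omega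
  have hfi0 : PySem.List.pyGetD fac i 0 = fac.getD i.toNat 0 := by
    conv_lhs => rw [show i = ((i.toNat : Nat) : Int) by omega]
    rw [PySem.List.pyGetD_natCast]
  have hfi : fac[i.toNat]? = some (PySem.List.pyGetD fac i 0) := by
    rw [hfi0, List.getD_eq_getElem?_getD, List.getElem?_eq_getElem hiN]
    simp
  split
  case isTrue hguard =>
    have hv0 : PySem.List.pyGetD fac i 0 = 0 := by
      have := (beq_iff_eq).mp hguard; exact this
    rw [hv0] at hfi
    have hz := hprop i.toNat 0 hfi
    have hz' : ∀ q : Int, 2 ≤ q → q ≤ i - 1 → Nat.Prime q.toNat → ¬ q ∣ i := by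
      rcases hz with ⟨-, hz⟩ | ⟨hpr, -⟩
      · intro q h1 h2 h3
        have := hz q h1 h2 h3 (by omega)
        rwa [show ((i.toNat : Nat) : Int) = i by omega] at this
      · exact absurd hpr (by norm_num)
    have hi_prime : Nat.Prime i.toNat := by
      by_contra hnp
      obtain ⟨P, hP, hPd⟩ := Nat.exists_prime_and_dvd (show i.toNat ≠ 1 by omega)
      have hPle : P ≤ i.toNat := Nat.le_of_dvd (by omega) hPd
      have hPne : P ≠ i.toNat := by rintro rfl; exact hnp hP
      have hdvd : (P : Int) ∣ i := by
        have := Int.natCast_dvd_natCast.mpr hPd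
        rwa [show ((i.toNat : Nat) : Int) = i by omega] at this
      exact hz' (P : Int) (by exact_mod_cast hP.two_le) (by omega)
        (by simpa using hP) hdvd
    constructor
    · rw [pv_facInnerLen, hlen]
    · intro t v' hres
      rw [pv_facInner num i (by omega) fac t] at hres
      cases h : fac[t]? with
      | none => rw [h] at hres; simp at hres
      | some v =>
        have htlen : t < fac.length := List.getElem?_eq_some_iff.mp h |>.1
        have htnum : (t : Int) < num + 1 := by
          rw [hlen] at htlen; omega
        rw [h] at hres
        simp only [Option.map_some, Option.some.injEq] at hres
        by_cases hcond : (i ≤ (t : Int) ∧ (t : Int) < num + 1 ∧ i ∣ (t : Int)) ∧ v = 0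
        · rw [if_pos hcond] at hres
          right
          exact ⟨hres ▸ hi_prime, hres ▸ hcond.1.2.2, by omega, by omega⟩
        · rw [if_neg hcond] at hres
          subst hres
          rcases hprop t v h with ⟨hv0', hzb⟩ | ⟨h1, h2, h3, h4⟩
          · left
            refine ⟨hv0', fun q hq2 hqi hqp ht1 => ?_⟩
            by_cases hqlast : q ≤ i - 1
            · exact hzb q hq2 hqlast hqp ht1
            · have hqe : q = i := by omega
              subst hqe
              intro hdvd
              exact hcond ⟨⟨Int.le_of_dvd (by omega) hdvd, htnum, hdvd⟩, hv0'⟩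
          · right
            exact ⟨h1, h2, h3, by omega⟩
  case isFalse hguard =>
    have hw : PySem.List.pyGetD fac i 0 ≠ 0 := by
      intro hh; exact hguard (by simp [hh])
    have hwp := hprop i.toNat _ hfi
    have hcast : ((i.toNat : Nat) : Int) = i := by omega
    have hinp : ¬ Nat.Prime i.toNat := by
      rcases hwp with ⟨hz, -⟩ | ⟨h1, h2, h3, h4⟩
      · exact absurd hz hw
      · rw [hcast] at h2
        intro hip
        set w := PySem.List.pyGetD fac i 0 with hwdef
        obtain ⟨c, hc⟩ := h2
        have hc0 : (0:Int) ≤ c := by nlinarith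
        have key : ((w.toNat * c.toNat : Nat) : Int) = ((i.toNat : Nat) : Int) := by
          push_cast
          rw [Int.toNat_of_nonneg (by omega), Int.toNat_of_nonneg hc0,
            Int.toNat_of_nonneg (by omega)]
          linarith
        have hwdvd : w.toNat ∣ i.toNat := ⟨c.toNat, (Int.natCast_inj.mp key).symm⟩
        rcases (Nat.Prime.eq_one_or_self_of_dvd hip _ hwdvd) with hh | hh
        · omega
        · omega
    constructor
    · exact hlen
    · intro t v h
      rcases hprop t v h with ⟨hv0', hzb⟩ | ⟨g1, g2, g3, g4⟩
      · left
        refine ⟨hv0', fun q hq2 hqi hqp ht1 => ?_⟩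
        by_cases hqlast : q ≤ i - 1
        · exact hzb q hq2 hqlast hqp ht1
        · have hqe : q = i := by omega
          subst hqe
          exact absurd hqp hinp
      · right
        exact ⟨g1, g2, g3, by omega⟩

lemma pv_facFold (num : Int) : ∀ (n : Nat) (a : Int) (fac : List Int), 2 ≤ a →
    (num + 1 - a).toNat = n → pvFacInv num (a - 1) fac →
    pvFacInv num (max (a - 1) num)
      ((PySem.List.pyRange a (num + 1) 1).foldl (fun fac i =>
        if PySem.List.pyGetD fac i 0 == 0 then
          (PySem.List.pyRange i (num + 1) i).foldl (fun fac j =>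
            if PySem.List.pyGetD fac j 0 == 0 then fac.modify j.toNat (fun _ => i) else fac) fac
        else fac) fac) := by
  intro n
  induction n with
  | zero =>
    intro a fac ha hn hinv
    rw [PySem.List.pyRange_one_eq_nil (by omega)]
    simp only [List.foldl_nil]
    rw [max_eq_left (by omega : num ≤ a - 1)]
    exact hinv
  | succ n ih =>
    intro a fac ha hn hinv
    have hab : a < num + 1 := by omega
    rw [PySem.List.pyRange_one_cons hab, List.foldl_cons]
    have hstep := pv_facStep num a ha (by omega) fac hinv
    have hres := ih (a + 1) _ (by omega) (by omega)
      (by rw [show a + 1 - 1 = a by ring]; exact hstep)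
    rw [show a + 1 - 1 = a by ring, max_eq_right (by omega : a ≤ num)] at hres
    rw [max_eq_right (by omega : a - 1 ≤ num)]
    exact hres

lemma pv_pyGetD_some (l : List Int) (x : Int) (hx : 0 ≤ x) (hlt : x.toNat < l.length) :
    l[x.toNat]? = some (PySem.List.pyGetD l x 0) := by
  have h0 : PySem.List.pyGetD l x 0 = l.getD x.toNat 0 := by
    conv_lhs => rw [show x = ((x.toNat : Nat) : Int) by omega]
    rw [PySem.List.pyGetD_natCast]
  rw [h0, List.getD_eq_getElem?_getD, List.getElem?_eq_getElem hlt]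
  simp

lemma pv_fac_good (num m : Int) (h2 : 2 ≤ m) (hm : m ≤ num) :
    Nat.Prime (PySem.List.pyGetD (pvFac num) m 0).toNat ∧
      (PySem.List.pyGetD (pvFac num) m 0) ∣ m ∧ 2 ≤ PySem.List.pyGetD (pvFac num) m 0 := by
  have hnum2 : 2 ≤ num := le_trans h2 hm
  have hinv0 : pvFacInv num 1 (List.replicate (num + 1).toNat 0) := by
    constructor
    · simp
    · intro t v h
      have hv0 : v = 0 := by
        rcases Nat.lt_or_ge t (num + 1).toNat with hlt | hge
        · rw [List.getElem?_eq_getElem (by simpa using hlt)] at h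
          simp at h
          omega
        · rw [List.getElem?_eq_none_iff.mpr (by simpa using hge)] at h
          simp at h
      exact Or.inl ⟨hv0, fun q hq2 hq1 _ _ => by omega⟩
  have hfold := pv_facFold num (num + 1 - 2).toNat 2 (List.replicate (num + 1).toNat 0)
    (le_refl 2) rfl (by rw [show (2:Int) - 1 = 1 by ring]; exact hinv0)
  rw [max_eq_right (by omega : 2 - 1 ≤ num)] at hfold
  obtain ⟨hlen, hprop⟩ : pvFacInv num num (pvFac num) := hfold
  have hmN : m.toNat < (pvFac num).length := by rw [hlen]; omega
  have hfi := pv_pyGetD_some (pvFac num) m (by omega) hmN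
  have hcast : ((m.toNat : Nat) : Int) = m := by omega
  rcases hprop m.toNat _ hfi with ⟨hz, hzb⟩ | ⟨g1, g2, g3, -⟩
  · exfalso
    obtain ⟨P, hP, hPd⟩ := Nat.exists_prime_and_dvd (show m.toNat ≠ 1 by omega)
    have hPle : P ≤ m.toNat := Nat.le_of_dvd (by omega) hPd
    have hdvd : (P : Int) ∣ (m.toNat : Int) := Int.natCast_dvd_natCast.mpr hPd
    exact hzb (P : Int) (by exact_mod_cast hP.two_le) (by omega) (by simpa using hP)
      (by omega) hdvd
  · rw [hcast] at g2
    exact ⟨g1, g2, g3⟩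

lemma pv_strip (q : Int) (hq : 2 ≤ q) : ∀ (fuel : Nat) (m : Int), 1 ≤ m → m ≤ (fuel : Int) →
    ∀ (pw : Int) (pows : List Int),
    ∃ k : Nat, q ^ k ∣ m ∧ ¬ q ^ (k + 1) ∣ m ∧
      pvStrip q fuel m pw pows =
        (m / q ^ k, pw * q ^ k, pows ++ (List.range k).map (fun i => pw * q ^ (i + 1))) := by
  intro fuel
  induction fuel with
  | zero =>
    intro m hm hf pw pows
    exfalso
    push_cast at hf
    omega
  | succ fuel ih =>
    intro m hm hf pw pows
    by_cases hdvd : q ∣ m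
    case neg =>
      have hmod : (PySem.Int.mod m q == 0) = false := by
        simp [PySem.Int.mod_eq_zero_iff_dvd, hdvd]
      refine ⟨0, by simp, by simpa using hdvd, ?_⟩
      simp [pvStrip, hmod]
    · have hmod : (PySem.Int.mod m q == 0) = true := by
        simp [PySem.Int.mod_eq_zero_iff_dvd, hdvd]
      obtain ⟨m', hm'eq⟩ := hdvd
      have hm'1 : 1 ≤ m' := by nlinarith
      have hfd : PySem.Int.floordiv m q = m' := by
        rw [PySem.Int.floordiv_eq_ediv_of_pos (by omega), hm'eq,
          Int.mul_ediv_cancel_left _ (by omega)]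
      have hm'f : m' ≤ (fuel : Int) := by
        push_cast at hf ⊢
        nlinarith
      obtain ⟨k, hk1, hk2, hk3⟩ := ih m' hm'1 hm'f (pw * q) (pows ++ [pw * q])
      refine ⟨k + 1, ?_, ?_, ?_⟩
      · rw [hm'eq, pow_succ']
        exact mul_dvd_mul_left q hk1
      · intro hc
        apply hk2
        rw [hm'eq, pow_succ'] at hc
        exact (mul_dvd_mul_iff_left (by omega : (q:Int) ≠ 0)).mp hc
      · have hstep : pvStrip q (fuel + 1) m pw pows =
            pvStrip q fuel (PySem.Int.floordiv m q) (pw * q) (pows ++ [pw * q]) := by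
          simp [pvStrip, hmod]
        rw [hstep, hfd, hk3]
        obtain ⟨t, ht⟩ := hk1
        simp only [Prod.mk.injEq]
        refine ⟨?_, ?_, ?_⟩
        · rw [ht, Int.mul_ediv_cancel_left _ (by positivity),
            hm'eq, ht, show q * (q ^ k * t) = q ^ (k+1) * t by ring,
            Int.mul_ediv_cancel_left _ (by positivity)]
        · ring
        · have hhead : (List.range (k + 1)).map (fun i => pw * q ^ (i + 1)) =
              (pw * q) :: (List.range k).map (fun i => pw * q * q ^ (i + 1)) := by
            rw [List.range_succ_eq_map, List.map_cons, List.map_map]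
            congr 1
            · norm_num
            · apply List.map_congr_left
              intro i _
              simp only [Function.comp, Nat.succ_eq_add_one]
              ring
          rw [hhead, List.append_assoc, List.singleton_append]

-- decomposition of a divisor of Q^k * M' along the prime Q
lemma pv_decomp (Q : Nat) (hQ : Q.Prime) (M' : Nat) :
    ∀ (k : Nat) (E : Nat), E ∣ Q ^ k * M' → ∃ i ≤ k, ∃ e, e ∣ M' ∧ E = Q ^ i * e := by
  intro k
  induction k with
  | zero =>
    intro E hE
    exact ⟨0, le_refl 0, E, by simpa using hE, by simp⟩
  | succ k ih =>
    intro E hE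
    by_cases hQE : Q ∣ E
    · obtain ⟨E', rfl⟩ := hQE
      have hE' : E' ∣ Q ^ k * M' := by
        rw [pow_succ', mul_assoc] at hE
        exact (mul_dvd_mul_iff_left hQ.pos.ne').mp hE
      obtain ⟨i, hik, e, he, rfl⟩ := ih E' hE'
      exact ⟨i + 1, by omega, e, he, by ring⟩
    · have hcop : Nat.Coprime E (Q ^ (k + 1)) :=
        (((Nat.Prime.coprime_iff_not_dvd hQ).mpr hQE).symm).pow_right _
      refine ⟨0, by omega, E, ?_, by simp⟩
      rw [mul_comm] at hE
      exact hcop.dvd_of_dvd_mul_right hE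

lemma pv_gcd_not_dvd (q d m : Int) (hq : 2 ≤ q) (hqm : q ∣ m) (hg : Int.gcd d m = 1) :
    ¬ q ∣ d := by
  intro hc
  have hdg : q.natAbs ∣ Int.gcd d m :=
    Nat.dvd_gcd (Int.natAbs_dvd_natAbs.mpr hc) (Int.natAbs_dvd_natAbs.mpr hqm)
  rw [hg] at hdg
  have := Nat.le_of_dvd (by norm_num) hdg
  omega

lemma pv_mul_pow_inj_aux (q d1 d2 : Int) (i j : Nat) (hq : 2 ≤ q)
    (h1 : ¬ q ∣ d1) (hij : i ≤ j) (heq : d1 * q ^ i = d2 * q ^ j) : d1 = d2 ∧ i = j := by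
  have hsplit : q ^ j = q ^ (j - i) * q ^ i := by
    rw [← pow_add]
    congr 1
    omega
  rw [hsplit, ← mul_assoc] at heq
  have hd : d1 = d2 * q ^ (j - i) := mul_right_cancel₀ (pow_ne_zero i (by omega)) heq
  by_cases hie : i = j
  · subst hie
    simp at hd
    exact ⟨hd, rfl⟩
  · exfalso
    apply h1
    obtain ⟨s, hs⟩ : ∃ s, j - i = s + 1 := ⟨j - i - 1, by omega⟩
    rw [hd, hs, pow_succ]
    exact ⟨d2 * q ^ s, by ring⟩

lemma pv_mul_pow_inj (q d1 d2 : Int) (i j : Nat) (hq : 2 ≤ q)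
    (h1 : ¬ q ∣ d1) (h2 : ¬ q ∣ d2) (heq : d1 * q ^ i = d2 * q ^ j) : d1 = d2 ∧ i = j := by
  rcases le_total i j with h | h
  · exact pv_mul_pow_inj_aux q d1 d2 i j hq h1 h heq
  · obtain ⟨h1', h2'⟩ := pv_mul_pow_inj_aux q d2 d1 j i hq h2 h heq.symm
    exact ⟨h1'.symm, h2'.symm⟩

lemma pv_gen (num : Int) (fac : List Int)
    (hfac : ∀ m : Int, 2 ≤ m → m ≤ num →
      Nat.Prime (PySem.List.pyGetD fac m 0).toNat ∧
        (PySem.List.pyGetD fac m 0) ∣ m ∧ 2 ≤ PySem.List.pyGetD fac m 0) :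
    ∀ (fuel : Nat) (m : Int), 1 ≤ m → m ≤ num → m ≤ (fuel : Int) →
    ∀ divs : List Int, divs.Nodup → (∀ d ∈ divs, 1 ≤ d) →
      (∀ d ∈ divs, Int.gcd d m = 1) →
      (pvGen fac fuel m divs).Nodup ∧ (∀ x ∈ pvGen fac fuel m divs, 1 ≤ x) ∧
      (∀ x, x ∈ pvGen fac fuel m divs ↔ ∃ d ∈ divs, ∃ e : Int, 1 ≤ e ∧ e ∣ m ∧ x = d * e) := by
  intro fuel
  induction fuel with
  | zero =>
    intro m hm1 hmnum hmfuel divs hnd hpos hcop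
    exfalso
    push_cast at hmfuel
    omega
  | succ fuel ih =>
    intro m hm1 hmnum hmfuel divs hnd hpos hcop
    by_cases h1m : 1 < m
    case neg =>
      have hm1' : m = 1 := by omega
      have hval : pvGen fac (fuel + 1) m divs = divs := by
        simp [pvGen, h1m]
      rw [hval]
      refine ⟨hnd, hpos, fun x => ⟨fun hx => ⟨x, hx, 1, le_refl 1, one_dvd m, (mul_one x).symm⟩, ?_⟩⟩
      rintro ⟨d, hd, e, he1, hedvd, rfl⟩
      rw [hm1'] at hedvd
      rw [Int.eq_one_of_dvd_one (by omega) hedvd, mul_one]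
      exact hd
    obtain ⟨hqprime, hqdvd, hq2⟩ := hfac m (by omega) hmnum
    obtain ⟨k, hk1, hk2, hk3⟩ :=
      pv_strip (PySem.List.pyGetD fac m 0) hq2 m.toNat m hm1 (by omega) 1 []
    set q := PySem.List.pyGetD fac m 0 with hqdef
    have hk0 : k ≠ 0 := by
      rintro rfl
      exact hk2 (by simpa using hqdvd)
    obtain ⟨t, ht⟩ := hk1
    have hqk2 : 2 ≤ q ^ k := le_trans hq2 (le_self_pow₀ (by omega) hk0)
    have ht1 : 1 ≤ t := by nlinarith
    have hm't : m / q ^ k = t := by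
      rw [ht, Int.mul_ediv_cancel_left _ (by positivity)]
    have htnum : t ≤ num := le_trans (Int.le_of_dvd (by omega) ⟨q ^ k, by rw [ht]; ring⟩) hmnum
    have htfuel : t ≤ (fuel : Int) := by
      push_cast at hmfuel
      nlinarith
    have hqndvd_t : ¬ q ∣ t := by
      intro hc
      apply hk2
      obtain ⟨c, hc'⟩ := hc
      exact ⟨c, by rw [ht, hc']; ring⟩
    have hfst : (pvStrip q m.toNat m 1 []).1 = t := by rw [hk3]; exact hm't
    have hpows : (pvStrip q m.toNat m 1 []).2.2 = (List.range k).map (fun i => q ^ (i + 1)) := by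
      rw [hk3]
      simp
    have hq_not_dvd : ∀ d ∈ divs, ¬ q ∣ d := fun d hd =>
      pv_gcd_not_dvd q d m hq2 hqdvd (hcop d hd)
    have hval : pvGen fac (fuel + 1) m divs =
        pvGen fac fuel t (divs ++ divs.flatMap (fun d =>
          ((List.range k).map (fun i => q ^ (i + 1))).map (fun w => d * w))) := by
      conv_lhs => rw [pvGen]
      rw [if_pos h1m, ← hqdef, hfst, hpows]
    set divs' := divs ++ divs.flatMap (fun d =>
      ((List.range k).map (fun i => q ^ (i + 1))).map (fun w => d * w)) with hdivs'
    have hmem' : ∀ x, x ∈ divs' ↔ ∃ d ∈ divs, ∃ i : Nat, i ≤ k ∧ x = d * q ^ i := by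
      intro x
      rw [hdivs', List.mem_append, List.mem_flatMap]
      constructor
      · rintro (hx | ⟨d, hd, hx⟩)
        · exact ⟨x, hx, 0, by omega, by simp⟩
        · simp only [List.mem_map, List.mem_range] at hx
          obtain ⟨w, ⟨i, hik, rfl⟩, rfl⟩ := hx
          exact ⟨d, hd, i + 1, by omega, rfl⟩
      · rintro ⟨d, hd, i, hik, rfl⟩
        cases i with
        | zero => left; simpa using hd
        | succ j =>
          right
          refine ⟨d, hd, ?_⟩
          simp only [List.mem_map, List.mem_range]
          exact ⟨q ^ (j + 1), ⟨j, by omega, rfl⟩, rfl⟩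
    have hinner : ∀ d : Int, ((List.range k).map (fun i => q ^ (i + 1))).map (fun w => d * w) =
        (List.range k).map (fun i => d * q ^ (i + 1)) := by
      intro d
      rw [List.map_map]
      rfl
    have hnd' : divs'.Nodup := by
      rw [hdivs', List.nodup_append]
      refine ⟨hnd, ?_, ?_⟩
      · rw [List.nodup_flatMap]
        constructor
        · intro d hd
          rw [hinner d]
          refine List.Nodup.map_on ?_ List.nodup_range
          intro i hi j hj heq
          have := pv_mul_pow_inj q d d (i + 1) (j + 1) hq2
            (hq_not_dvd d hd) (hq_not_dvd d hd) heq
          omega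
        · refine hnd.imp_of_mem ?_
          intro d1 d2 hd1 hd2 hne
          rw [Function.onFun, hinner d1, hinner d2]
          intro x hx1 hx2
          simp only [List.mem_map, List.mem_range] at hx1 hx2
          obtain ⟨i, -, rfl⟩ := hx1
          obtain ⟨j, -, hx⟩ := hx2
          exact hne (pv_mul_pow_inj q d1 d2 (i + 1) (j + 1) hq2
            (hq_not_dvd d1 hd1) (hq_not_dvd d2 hd2) hx.symm).1
      · intro x hxd y hyf
        rw [List.mem_flatMap] at hyf
        obtain ⟨d, hd, hy⟩ := hyf
        rw [hinner d] at hy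
        simp only [List.mem_map, List.mem_range] at hy
        obtain ⟨i, -, rfl⟩ := hy
        rintro rfl
        exact hq_not_dvd _ hxd ⟨d * q ^ i, by ring⟩
    have hpos' : ∀ x ∈ divs', 1 ≤ x := by
      intro x hx
      rw [hmem' x] at hx
      obtain ⟨d, hd, i, -, rfl⟩ := hx
      have := hpos d hd
      have h1q : (1:Int) ≤ q ^ i := one_le_pow₀ (by omega)
      nlinarith
    have hcop' : ∀ x ∈ divs', Int.gcd x t = 1 := by
      intro x hx
      rw [hmem' x] at hx
      obtain ⟨d, hd, i, -, rfl⟩ := hx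
      have hdt : Nat.Coprime d.natAbs t.natAbs :=
        Nat.Coprime.coprime_dvd_right (Int.natAbs_dvd_natAbs.mpr ⟨q ^ k, by rw [ht]; ring⟩)
          (hcop d hd)
      have hqt : Nat.Coprime q.natAbs t.natAbs := by
        have hqp : Nat.Prime q.natAbs := by
          rwa [show q.natAbs = q.toNat by omega]
        refine (Nat.Prime.coprime_iff_not_dvd hqp).mpr ?_
        intro hc
        exact hqndvd_t (Int.natAbs_dvd_natAbs.mp hc)
      show Int.gcd (d * q ^ i) t = 1
      rw [Int.gcd]
      rw [Int.natAbs_mul, Int.natAbs_pow]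
      exact Nat.Coprime.mul_left hdt (hqt.pow_left i)
    obtain ⟨ihnd, ihpos, ihmem⟩ := ih t ht1 htnum htfuel divs' hnd' hpos' hcop'
    rw [hval]
    refine ⟨ihnd, ihpos, fun x => ?_⟩
    rw [ihmem x]
    constructor
    · rintro ⟨d', hd', e, he1, hedvd, rfl⟩
      rw [hmem' d'] at hd'
      obtain ⟨d, hd, i, hik, rfl⟩ := hd'
      refine ⟨d, hd, q ^ i * e, ?_, ?_, by ring⟩
      · have h1q : (1:Int) ≤ q ^ i := one_le_pow₀ (by omega)
        nlinarith
      · rw [ht]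
        exact mul_dvd_mul (pow_dvd_pow q hik) hedvd
    · rintro ⟨d, hd, E, hE1, hEdvd, rfl⟩
      have hqp : Nat.Prime q.natAbs := by rwa [show q.natAbs = q.toNat by omega]
      have hEn : E.natAbs ∣ q.natAbs ^ k * t.natAbs := by
        have h1 : E.natAbs ∣ m.natAbs := Int.natAbs_dvd_natAbs.mpr hEdvd
        rwa [ht, Int.natAbs_mul, Int.natAbs_pow] at h1
      obtain ⟨i, hik, e, hedvd, hEeq⟩ := pv_decomp q.natAbs hqp t.natAbs k E.natAbs hEn
      have he1 : 1 ≤ e := Nat.pos_of_dvd_of_pos hedvd (by omega)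
      have hEcast : E = q ^ i * (e : Int) := by
        have h0 : ((E.natAbs : Nat) : Int) = ((q.natAbs ^ i * e : Nat) : Int) := by
          exact_mod_cast congrArg (fun n : Nat => (n : Int)) hEeq
        push_cast at h0
        rw [abs_of_nonneg (by omega : (0:Int) ≤ E), abs_of_nonneg (by omega : (0:Int) ≤ q)] at h0
        exact h0
      have hedvd' : (e : Int) ∣ t := by
        have := Int.natCast_dvd_natCast.mpr hedvd
        rwa [Int.natAbs_of_nonneg (by omega : (0:Int) ≤ t)] at this
      refine ⟨d * q ^ i, ?_, (e : Int), by exact_mod_cast he1, hedvd', by rw [hEcast]; ring⟩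
      rw [hmem']
      exact ⟨d, hd, i, hik, rfl⟩

lemma pv_sortedB (num p : Int) (h1 : 1 ≤ p) (h2 : p ≤ num) :
    PySem.List.sorted (pvGen (pvFac num) p.toNat p [1]) (fun x => x) false =
      ((PySem.List.pyRange 1 (num + 1) 1).filter
        (fun cf => decide (2 * cf ≤ p ∧ p < num + 1 ∧ cf ∣ p))) ++ [p] := by
  obtain ⟨hnd, hpos, hmem⟩ := pv_gen num (pvFac num)
    (fun m hm1 hm2 => pv_fac_good num m hm1 hm2) p.toNat p h1 h2 (by omega) [1]
    (by simp) (by simp) (by simp)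
  have hmemG : ∀ x, x ∈ pvGen (pvFac num) p.toNat p [1] ↔ 1 ≤ x ∧ x ∣ p := by
    intro x
    rw [hmem x]
    constructor
    · rintro ⟨d, hd, e, he1, hedvd, rfl⟩
      rw [List.mem_singleton] at hd
      subst hd
      rw [one_mul]
      exact ⟨he1, hedvd⟩
    · rintro ⟨hx1, hxd⟩
      exact ⟨1, List.mem_singleton_self 1, x, hx1, hxd, (one_mul x).symm⟩
  have hfilter_mem : ∀ x, x ∈ (PySem.List.pyRange 1 (num + 1) 1).filter
      (fun cf => decide (2 * cf ≤ p ∧ p < num + 1 ∧ cf ∣ p)) ↔ 1 ≤ x ∧ x ∣ p ∧ x < p := by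
    intro x
    rw [List.mem_filter, PySem.List.mem_pyRange_one]
    simp only [decide_eq_true_eq]
    constructor
    · rintro ⟨⟨hx1, -⟩, h2x, -, hxd⟩
      exact ⟨hx1, hxd, by omega⟩
    · rintro ⟨hx1, hxd, hxp⟩
      exact ⟨⟨hx1, by omega⟩, pv_two_mul_le x p hx1 hxp hxd, by omega, hxd⟩
  have hysmem : ∀ x, x ∈ ((PySem.List.pyRange 1 (num + 1) 1).filter
      (fun cf => decide (2 * cf ≤ p ∧ p < num + 1 ∧ cf ∣ p))) ++ [p] ↔ 1 ≤ x ∧ x ∣ p := by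
    intro x
    rw [List.mem_append, List.mem_singleton, hfilter_mem x]
    constructor
    · rintro (⟨hx1, hxd, -⟩ | rfl)
      · exact ⟨hx1, hxd⟩
      · exact ⟨h1, dvd_refl _⟩
    · rintro ⟨hx1, hxd⟩
      by_cases hxp : x = p
      · exact Or.inr hxp
      · exact Or.inl ⟨hx1, hxd, lt_of_le_of_ne (Int.le_of_dvd (by omega) hxd) hxp⟩
  have hpairwise : (((PySem.List.pyRange 1 (num + 1) 1).filter
      (fun cf => decide (2 * cf ≤ p ∧ p < num + 1 ∧ cf ∣ p))) ++ [p]).Pairwise (· < ·) := by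
    rw [List.pairwise_append]
    refine ⟨List.Pairwise.filter _ (PySem.List.pairwise_lt_pyRange_one _ _), by simp, ?_⟩
    intro a ha b hb
    rw [List.mem_singleton] at hb
    subst hb
    obtain ⟨ha1, -, hap⟩ := (hfilter_mem a).mp ha
    exact hap
  have hndys := hpairwise.imp (fun h => ne_of_lt h)
  have hperm := (List.perm_ext_iff_of_nodup hndys hnd).mpr
    (fun x => by rw [hysmem x, hmemG x])
  exact PySem.List.sorted_eq_of_perm_of_pairwise_lt _ _ (fun x => x) hperm hpairwise

-- ===== VERDICT (by name: the statement is the Claim_ definition above) =====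
theorem get_factors_of_all_numbers_less_than_spec : Claim_equal_get_factors_of_all_numbers_less_than := by
  intro num _
  unfold Spec_get_factors_of_all_numbers_less_than
  unfold get_factors_of_all_numbers_less_than get_factors_of_all_numbers_less_than_alt
  simp only [PySem.List.slice_from_one, PySem.List.foldl_append_singleton_eq_map, List.nil_append]
  apply List.map_congr_left
  intro p hp
  rw [PySem.List.mem_pyRange_one] at hp
  have hp0 : p = ((p.toNat : Nat) : Int) := by omega
  have hlen : p.toNat < ((PySem.List.pyRange 0 (num + 1) 1).map (fun _ => ([] : List Int))).length := by
    rw [List.length_map, PySem.List.length_pyRange_one]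
    omega
  have hfm0 : ((PySem.List.pyRange 0 (num + 1) 1).map (fun _ => ([] : List Int)))[p.toNat]? = some [] := by
    rw [List.getElem?_eq_getElem hlen]
    simp
  have hCA : ∀ c ∈ PySem.List.pyRange 1 (num + 1) 1, 1 ≤ c := by
    intro c hc; rw [PySem.List.mem_pyRange_one] at hc; omega
  have houterA := pv_outer num (PySem.List.pyRange 1 (num + 1) 1) hCA
      ((PySem.List.pyRange 0 (num + 1) 1).map (fun _ => ([] : List Int))) p.toNat
  rw [hfm0] at houterA
  simp only [Option.map_some, List.nil_append] at houterA
  rw [hp0, PySem.List.pyGetD_natCast, List.getD_eq_getElem?_getD, houterA]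
  simp only [Option.getD_some]
  rw [← hp0, pv_sortedB num p (by omega) (by omega), PySem.List.slice_to_neg_one,
    List.dropLast_concat]
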